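-- pv_equiv track=rewrite | github.com/luiscf1226/PruebaInicialC- | scripts/extract_elements.py | calcular_metricas_codigo
-- ===== SOURCE A (Python) =====
-- def calcular_metricas_codigo(contenido):
--     lineas = contenido.split('\n')
--     return {
--         'total_lineas': len(lineas),
--         'lineas_codigo': len([l for l in lineas if l.strip() and not l.strip().startswith('//')]),
--         'lineas_comentarios': len([l for l in lineas if l.strip().startswith('//')]),
--         'lineas_vacias': len([l for l in lineas if not l.strip()]),
--     }
-- ===== SOURCE B (Python) =====
-- def calcular_metricas_codigo(contenido):
--     lineas = contenido.split('\n')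
--     codigo = comentarios = vacias = 0
--     for l in lineas:
--         s = l.strip()
--         if not s:
--             vacias += 1
--         elif s.startswith('//'):
--             comentarios += 1
--         else:
--             codigo += 1
--     return {
--         'total_lineas': len(lineas),
--         'lineas_codigo': codigo,
--         'lineas_comentarios': comentarios,
--         'lineas_vacias': vacias,
--     }
-- ===== Notes on version B (the rewrite author's own statement) =====
-- stated objective: simpler
-- what changed: Replaces the four separate list-comprehension scans with a single loop over the lines that strips each line once and classifies it into one of three mutually exclusive counters.
import Mathlib
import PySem

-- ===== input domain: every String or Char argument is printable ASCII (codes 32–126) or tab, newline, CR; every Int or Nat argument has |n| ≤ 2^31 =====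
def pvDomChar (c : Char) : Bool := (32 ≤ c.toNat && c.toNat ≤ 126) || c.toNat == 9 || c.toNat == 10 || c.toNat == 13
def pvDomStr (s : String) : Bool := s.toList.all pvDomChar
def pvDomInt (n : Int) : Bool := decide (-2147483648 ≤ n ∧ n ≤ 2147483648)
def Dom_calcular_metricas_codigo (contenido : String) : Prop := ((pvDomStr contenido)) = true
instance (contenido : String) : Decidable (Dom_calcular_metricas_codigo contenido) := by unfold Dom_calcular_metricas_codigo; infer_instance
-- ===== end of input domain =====

-- B replaces A's four list-comprehension scans by one pass with three counters (objective: simpler).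

-- ===== PORT A =====
def calcular_metricas_codigo (contenido : String) : List (String × Int) :=
  let lineas := (PySem.Str.split? contenido "\n").getD []
  [("total_lineas", (lineas.length : Int)),
   ("lineas_codigo",
     ((lineas.filter (fun l =>
        (PySem.Str.strip l != "") && !(PySem.Str.startswith (PySem.Str.strip l) "//"))).length : Int)),
   ("lineas_comentarios",
     ((lineas.filter (fun l => PySem.Str.startswith (PySem.Str.strip l) "//")).length : Int)),
   ("lineas_vacias",
     ((lineas.filter (fun l => PySem.Str.strip l == "")).length : Int))]

-- ===== PORT B =====
-- loop body of Source B: classify one stripped line into (codigo, comentarios, vacias)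
def pvStep (acc : Int × Int × Int) (l : String) : Int × Int × Int :=
  let s := PySem.Str.strip l
  if s == "" then (acc.1, acc.2.1, acc.2.2 + 1)
  else if PySem.Str.startswith s "//" then (acc.1, acc.2.1 + 1, acc.2.2)
  else (acc.1 + 1, acc.2.1, acc.2.2)

def calcular_metricas_codigo_alt (contenido : String) : List (String × Int) :=
  let lineas := (PySem.Str.split? contenido "\n").getD []
  let r := lineas.foldl pvStep (0, 0, 0)
  [("total_lineas", (lineas.length : Int)),
   ("lineas_codigo", r.1),
   ("lineas_comentarios", r.2.1),
   ("lineas_vacias", r.2.2)]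

-- ===== PRECONDITION & SPEC =====
def Spec_calcular_metricas_codigo (contenido : String) (out : List (String × Int)) : Prop := out = calcular_metricas_codigo_alt contenido
instance (contenido : String) (out : List (String × Int)) : Decidable (Spec_calcular_metricas_codigo contenido out) := by unfold Spec_calcular_metricas_codigo; infer_instance

-- ===== CLAIM (what is proved, stated in full; the proofs are below) =====
def Claim_equal_calcular_metricas_codigo : Prop := ∀ (contenido : String), Dom_calcular_metricas_codigo contenido → Spec_calcular_metricas_codigo contenido (calcular_metricas_codigo contenido)

-- ===== LEMMAS AND PROOFS =====

lemma pv_strip_empty_iff (l : String) :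
    PySem.Str.strip l = "" ↔ PySem.Chars.strip l.toList = [] := by
  constructor
  · intro h; have := congrArg String.toList h; simpa using this
  · intro h
    have : (PySem.Str.strip l).toList = ("" : String).toList := by simpa using h
    exact String.toList_inj.mp this

lemma pv_fold_counts (ls : List String) (a b c : Int) :
    ls.foldl pvStep (a, b, c) =
      (a + ((ls.filter (fun l =>
              (PySem.Str.strip l != "") && !(PySem.Str.startswith (PySem.Str.strip l) "//"))).length : Int),
       b + ((ls.filter (fun l => PySem.Str.startswith (PySem.Str.strip l) "//")).length : Int),
       c + ((ls.filter (fun l => PySem.Str.strip l == "")).length : Int)) := by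
  induction ls generalizing a b c with
  | nil => simp
  | cons l t ih =>
    by_cases hs : PySem.Chars.strip l.toList = []
    · have hs' : PySem.Str.strip l = "" := (pv_strip_empty_iff l).mpr hs
      have hsw : PySem.Chars.startswith ([] : List Char) ['/', '/'] = false := by decide
      simp [pvStep, hs', hsw, List.foldl_cons, ih, hs]
      omega
    · have hs' : ¬ PySem.Str.strip l = "" := fun h => hs ((pv_strip_empty_iff l).mp h)
      by_cases hc : PySem.Chars.startswith (PySem.Chars.strip l.toList) ['/', '/'] = true
      · simp [pvStep, hs', hc, List.foldl_cons, ih]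
        omega
      · simp only [Bool.not_eq_true] at hc
        simp [pvStep, hs', hc, List.foldl_cons, ih]
        omega

-- ===== VERDICT (by name: the statement is the Claim_ definition above) =====
theorem calcular_metricas_codigo_spec : Claim_equal_calcular_metricas_codigo := by
  intro contenido _
  unfold Spec_calcular_metricas_codigo calcular_metricas_codigo calcular_metricas_codigo_alt
  simp [pv_fold_counts]
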